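-- pv_equiv track=rewrite | github.com/hvishwanath/ak2md | workflow/processors/special_files.py | _dedent_code_simple
-- ===== SOURCE A (Python) =====
-- def _dedent_code_simple(code_text: str) -> str:
--     """Remove 4 spaces from the beginning of each line"""
--     lines = code_text.split('\n')
--     result = []
--     for line in lines:
--         if line.startswith('    '):  # 4 spaces
--             result.append(line[4:])
--         else:
--             result.append(line)
--     return '\n'.join(result).strip()  # strip() to remove leading/trailing empty lines
-- ===== SOURCE B (Python) =====
-- def _dedent_code_simple(code_text: str) -> str:
--     """Single pass over the characters with a line-start flag: delete a
--     four-space prefix at each line start; no intermediate list of lines."""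
--     out = []
--     i, n = 0, len(code_text)
--     at_line_start = True
--     while i < n:
--         if at_line_start and code_text.startswith('    ', i):
--             i += 4
--             at_line_start = False
--             continue
--         c = code_text[i]
--         out.append(c)
--         at_line_start = (c == '\n')
--         i += 1
--     return ''.join(out).strip()
-- ===== Notes on version B (the rewrite author's own statement) =====
-- stated objective: alternative
-- what changed: Replaces A's split-into-lines / per-line loop with an intermediate result list / join pipeline by a single character-by-character scan that carries a line-start flag and deletes a four-space prefix at each line start, building the output directly.
import Mathlib
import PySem

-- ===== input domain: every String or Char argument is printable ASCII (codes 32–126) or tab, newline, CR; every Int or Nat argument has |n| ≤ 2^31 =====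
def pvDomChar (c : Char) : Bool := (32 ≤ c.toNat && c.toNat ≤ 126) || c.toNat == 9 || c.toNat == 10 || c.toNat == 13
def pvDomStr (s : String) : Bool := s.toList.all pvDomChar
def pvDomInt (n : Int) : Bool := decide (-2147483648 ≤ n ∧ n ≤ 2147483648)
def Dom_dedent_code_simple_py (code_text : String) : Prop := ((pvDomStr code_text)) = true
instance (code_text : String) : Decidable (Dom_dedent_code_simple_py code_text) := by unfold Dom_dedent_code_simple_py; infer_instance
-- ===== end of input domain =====

-- B replaces A's split/per-line-loop/join with a single character scan carrying a
-- line-start flag (objective: alternative; same O(n) cost).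

-- ===== PORT A =====
-- lines = code_text.split('\n'); for line in lines: append(line[4:] if line.startswith('    ') else line); '\n'.join(result).strip()
def dedent_code_simple_py (code_text : String) : String :=
  let lines := PySem.Chars.splitOn code_text.toList ['\n']
  let result := lines.foldl
    (fun acc line =>
      if PySem.Chars.startswith line [' ', ' ', ' ', ' '] then
        acc ++ [PySem.List.slice line (some 4) none]
      else
        acc ++ [line]) []
  String.ofList (PySem.Chars.strip (PySem.Chars.join ['\n'] result))

-- ===== PORT B =====
-- the scanner of Source B: at a line start drop a four-space prefix, otherwise copy
-- the character and record whether it was a newline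
def pvScan (cs : List Char) (atStart : Bool) : List Char :=
  if atStart && [' ', ' ', ' ', ' '].isPrefixOf cs then
    pvScan (cs.drop 4) false
  else
    match cs with
    | [] => []
    | c :: rest => c :: pvScan rest (c == '\n')
termination_by (cs.length, if atStart then 1 else 0)
decreasing_by
  · rename_i h
    simp only [Bool.and_eq_true] at h
    have hl : 4 ≤ cs.length := by
      rcases List.isPrefixOf_iff_prefix.mp h.2 with ⟨t, ht⟩
      subst ht; simp
    refine Prod.Lex.left _ _ ?_
    simp; omega
  · exact Prod.Lex.left _ _ (by simp)

def dedent_code_simple_py_alt (code_text : String) : String :=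
  String.ofList (PySem.Chars.strip (pvScan code_text.toList true))

-- ===== PRECONDITION & SPEC =====
def Spec_dedent_code_simple_py (code_text : String) (out : String) : Prop := out = dedent_code_simple_py_alt code_text
instance (code_text : String) (out : String) : Decidable (Spec_dedent_code_simple_py code_text out) := by unfold Spec_dedent_code_simple_py; infer_instance

-- ===== CLAIM (what is proved, stated in full; the proofs are below) =====
def Claim_equal_dedent_code_simple_py : Prop := ∀ (code_text : String), Dom_dedent_code_simple_py code_text → Spec_dedent_code_simple_py code_text (dedent_code_simple_py code_text)

-- ===== LEMMAS AND PROOFS =====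

-- (first line, remaining lines) of a character list, splitting at '\n'
def pvLines : List Char → List Char × List (List Char)
  | [] => ([], [])
  | c :: r =>
    let p := pvLines r
    if c = '\n' then ([], p.1 :: p.2) else (c :: p.1, p.2)

-- A's per-line transformation
def pvDedent (line : List Char) : List Char :=
  if PySem.Chars.startswith line [' ', ' ', ' ', ' '] then PySem.List.slice line (some 4) none
  else line

lemma pvDedent_prefix (r : List Char) :
    pvDedent ([' ', ' ', ' ', ' '] ++ r) = r := by
  have h1 : PySem.Chars.startswith ([' ', ' ', ' ', ' '] ++ r) [' ', ' ', ' ', ' '] = true := by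
    simp [PySem.Chars.startswith]
  rw [pvDedent, if_pos h1, PySem.List.slice_from (xs := [' ', ' ', ' ', ' '] ++ r) (a := 4) (by norm_num)]
  rfl

lemma pvLines_fst_prefix (cs : List Char) : (pvLines cs).1 <+: cs := by
  induction cs with
  | nil => simp [pvLines]
  | cons c r ih =>
    by_cases h : c = '\n' <;> simp [pvLines, h]
    exact ih

lemma splitOn_go_eq (fuel : Nat) : ∀ (l cur : List Char) (accs : List (List Char)),
    l.length < fuel →
    PySem.Chars.splitOn.go ['\n'] fuel l cur accs =
      accs.reverse ++ (cur.reverse ++ (pvLines l).1) :: (pvLines l).2 := by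
  induction fuel with
  | zero => intro l cur accs h; omega
  | succ f ih =>
    intro l cur accs hlen
    cases l with
    | nil =>
      rw [PySem.Chars.splitOn.go] <;> simp [pvLines]
    | cons c rest =>
      rw [PySem.Chars.splitOn.go]
      by_cases hc : c = '\n'
      · subst hc
        rw [if_pos (by simp [List.isPrefixOf])]
        rw [ih _ [] _ (by simp at hlen ⊢; omega)]
        simp [pvLines]
      · rw [if_neg (by simp [List.isPrefixOf]; exact fun h => hc h.symm)]
        rw [ih _ (c :: cur) _ (by simp at hlen ⊢; omega)]
        simp [pvLines, hc]

lemma splitOn_eq (cs : List Char) :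
    PySem.Chars.splitOn cs ['\n'] = (pvLines cs).1 :: (pvLines cs).2 := by
  rw [PySem.Chars.splitOn, splitOn_go_eq _ _ _ _ (Nat.lt_succ_self _)]
  simp

lemma join_flat (ls : List (List Char)) (x : List Char) :
    PySem.Chars.join ['\n'] (x :: ls) = x ++ ls.flatMap (fun l => '\n' :: l) := by
  induction ls generalizing x with
  | nil => simp [PySem.Chars.join, List.intercalate]
  | cons y t ih =>
    rw [PySem.Chars.join_cons_cons, ih]
    simp

lemma pvScan_spec (n : Nat) : ∀ cs : List Char, cs.length ≤ n →
    pvScan cs false = (pvLines cs).1 ++ (pvLines cs).2.flatMap (fun l => '\n' :: pvDedent l) ∧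
    pvScan cs true = pvDedent (pvLines cs).1 ++ (pvLines cs).2.flatMap (fun l => '\n' :: pvDedent l) := by
  induction n with
  | zero =>
    intro cs hlen
    have : cs = [] := List.length_eq_zero_iff.mp (Nat.le_zero.mp hlen)
    subst this
    constructor <;> · rw [pvScan]; simp [pvLines, pvDedent, PySem.Chars.startswith, List.isPrefixOf]
  | succ n ih =>
    intro cs hlen
    have hP : pvScan cs false =
        (pvLines cs).1 ++ (pvLines cs).2.flatMap (fun l => '\n' :: pvDedent l) := by
      cases cs with
      | nil => rw [pvScan]; simp [pvLines]
      | cons c rest =>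
        rw [pvScan]
        simp only [Bool.false_and, if_neg Bool.false_ne_true]
        by_cases hc : c = '\n'
        · subst hc
          have := (ih rest (by simp at hlen; omega)).2
          rw [show ('\n' == '\n') = true from rfl, this]
          simp [pvLines]
        · have := (ih rest (by simp at hlen; omega)).1
          rw [show (c == '\n') = false by simp [hc], this]
          simp [pvLines, hc]
    refine ⟨hP, ?_⟩
    by_cases hp : [' ', ' ', ' ', ' '].isPrefixOf cs
    · rcases List.isPrefixOf_iff_prefix.mp hp with ⟨r, rfl⟩
      rw [pvScan.eq_def, if_pos (by simp)]
      have hr : pvScan (List.drop 4 ([' ', ' ', ' ', ' '] ++ r)) false =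
          (pvLines r).1 ++ (pvLines r).2.flatMap (fun l => '\n' :: pvDedent l) := by
        have := (ih r (by simp at hlen; omega)).1
        simpa using this
      rw [hr]
      have hl : pvLines ([' ', ' ', ' ', ' '] ++ r) =
          (' ' :: ' ' :: ' ' :: ' ' :: (pvLines r).1, (pvLines r).2) := by
        simp [pvLines]
      rw [hl]
      rw [show (' ' :: ' ' :: ' ' :: ' ' :: (pvLines r).1 : List Char) =
            [' ', ' ', ' ', ' '] ++ (pvLines r).1 from rfl, pvDedent_prefix]
    · have heq : pvScan cs true = pvScan cs false := by
        conv_lhs => rw [pvScan.eq_def]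
        conv_rhs => rw [pvScan.eq_def]
        simp [hp]
      rw [heq, hP]
      have hnd : pvDedent (pvLines cs).1 = (pvLines cs).1 := by
        rw [pvDedent, if_neg ?_]
        intro hsw
        exact hp (List.isPrefixOf_iff_prefix.mpr
          ((List.isPrefixOf_iff_prefix.mp hsw).trans (pvLines_fst_prefix cs)))
      rw [hnd]

-- ===== VERDICT (by name: the statement is the Claim_ definition above) =====
theorem dedent_code_simple_py_spec : Claim_equal_dedent_code_simple_py := by
  intro code_text _
  unfold Spec_dedent_code_simple_py dedent_code_simple_py dedent_code_simple_py_alt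
  simp only [splitOn_eq]
  have hbody : (fun (acc : List (List Char)) line =>
      if PySem.Chars.startswith line [' ', ' ', ' ', ' '] then
        acc ++ [PySem.List.slice line (some 4) none]
      else acc ++ [line]) = fun acc line => acc ++ [pvDedent line] := by
    funext acc line
    rw [pvDedent]
    split <;> rfl
  rw [hbody, PySem.List.foldl_append_singleton_eq_map]
  rw [List.nil_append, List.map_cons, join_flat, List.flatMap_map]
  rw [(pvScan_spec code_text.toList.length code_text.toList le_rfl).2]
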